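-- pv_equiv track=rewrite | github.com/quangptt0910/ProgrammingInPython2024List3 | shingle.py | shingles
-- ===== SOURCE A (Python) =====
-- def shingles(t, k):
--     """
--         Generate k-shingles from a list of tokens.
--
--         Args:
--             t (list): List of tokens to generate shingles from
--             k (int): Size of each shingle
--
--         Returns:
--             list: List of k-shingles as tuples
--         """
--     # Handle edge cases
--     if k <= 0 or k > len(t):
--         return []
--
--     list_of_kShingle = []
--     if k == 0: return []
--     for i in range(0, len(t) - k + 1):
--         list_of_kShingle.append(tuple(t[i:i + k])) # tuple() will work
--     return list_of_kShingle
-- ===== SOURCE B (Python) =====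
-- def shingles(t, k):
--     """Generate k-shingles from a list of tokens (transpose of k shifted views)."""
--     if k <= 0 or k > len(t):
--         return []
--     return [tuple(row) for row in zip(*(t[i:] for i in range(k)))]
-- ===== Notes on version B (the rewrite author's own statement) =====
-- stated objective: idiomatic
-- what changed: Replaced the explicit start-index loop with per-index slicing by a column-wise transpose: zip of the k shifted views t[0:], t[1:], ..., t[k-1:].
import Mathlib
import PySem

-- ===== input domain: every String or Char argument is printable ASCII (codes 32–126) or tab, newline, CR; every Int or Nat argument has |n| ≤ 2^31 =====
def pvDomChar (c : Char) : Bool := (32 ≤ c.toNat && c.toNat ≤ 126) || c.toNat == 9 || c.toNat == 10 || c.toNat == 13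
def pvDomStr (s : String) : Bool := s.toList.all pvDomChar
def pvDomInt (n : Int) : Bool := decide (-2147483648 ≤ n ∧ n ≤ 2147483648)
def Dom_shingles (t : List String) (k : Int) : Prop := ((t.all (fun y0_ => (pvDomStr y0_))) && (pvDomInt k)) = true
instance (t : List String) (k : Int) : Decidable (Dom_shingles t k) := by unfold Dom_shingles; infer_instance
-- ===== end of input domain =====

-- B replaces A's start-index loop over slices by a column-wise transpose (zip) of k shifted views; idiomatic, same cost.


-- ===== PORT A =====
-- literal port: guard, (dead) k == 0 check, then the loop appending tuple(t[i:i+k]) for i in range(0, len(t)-k+1)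
def shingles (t : List String) (k : Int) : List (List String) :=
  if k ≤ 0 ∨ k > (t.length : Int) then []
  else if k = 0 then []
  else
    (PySem.List.pyRange 0 ((t.length : Int) - k + 1) 1).foldl
      (fun acc i => acc ++ [PySem.List.slice t (some i) (some (i + k))]) []

-- ===== PORT B =====
-- zip(*(cols)): first column drives the recursion; stop when any column is exhausted
def zipCols (c0 : List String) (rest : List (List String)) : List (List String) :=
  match c0 with
  | [] => []
  | x :: xs =>
    if rest.all (fun c => !c.isEmpty) then
      (x :: rest.map (fun c => c.headD "")) :: zipCols xs (rest.map (fun c => c.tail))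
    else []

def shingles_alt (t : List String) (k : Int) : List (List String) :=
  if k ≤ 0 ∨ k > (t.length : Int) then []
  else
    match (PySem.List.pyRange 0 k 1).map (fun i => PySem.List.slice t (some i) none) with
    | [] => []
    | c :: cs => zipCols c cs

-- ===== PRECONDITION & SPEC =====
def Spec_shingles (t : List String) (k : Int) (out : List (List String)) : Prop := out = shingles_alt t k
instance (t : List String) (k : Int) (out : List (List String)) : Decidable (Spec_shingles t k out) := by unfold Spec_shingles; infer_instance

-- ===== CLAIM (what is proved, stated in full; the proofs are below) =====
def Claim_equal_shingles : Prop := ∀ (t : List String) (k : Int), Dom_shingles t k → Spec_shingles t k (shingles t k)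

-- ===== LEMMAS AND PROOFS =====

-- canonical sliding-window list (used only with 1 ≤ k)
def windows (k : Nat) : List String → List (List String)
  | [] => []
  | x :: xs => if k ≤ xs.length + 1 then (List.take k (x :: xs)) :: windows k xs else []

lemma rangeMap_eq_windows (t : List String) (k : Nat) (hk : 1 ≤ k) (hle : k ≤ t.length) :
    (List.range (t.length - k + 1)).map (fun i => (t.drop i).take k) = windows k t := by
  induction t with
  | nil => simp at hle; omega
  | cons x xs ih =>
    simp only [List.length_cons] at hle ⊢
    have h1 : xs.length + 1 - k + 1 = (xs.length + 1 - k) + 1 := rfl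
    rw [h1, List.range_succ_eq_map, List.map_cons, List.map_map]
    simp only [windows, if_pos (by omega : k ≤ xs.length + 1)]
    congr 1
    by_cases h2 : k ≤ xs.length
    · have h3 : xs.length + 1 - k = xs.length - k + 1 := by omega
      rw [h3, ← ih h2]
      apply List.map_congr_left
      intro i _
      simp
    · have h3 : xs.length + 1 - k = 0 := by omega
      rw [h3]
      simp only [List.range_zero, List.map_nil]
      cases xs with
      | nil => simp [windows]
      | cons y ys =>
        rw [windows]
        rw [if_neg (by simp only [List.length_cons] at h2 ⊢; omega)]

lemma shingles_eq_windows (t : List String) (m : Nat) (h1 : 1 ≤ m) (h2 : m ≤ t.length) :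
    shingles t (m : Int) = windows m t := by
  unfold shingles
  rw [if_neg (by omega), if_neg (by omega)]
  have hb : (t.length : Int) - (m : Int) + 1 = ((t.length - m + 1 : Nat) : Int) := by omega
  rw [hb, PySem.List.pyRange_zero_natCast]
  have hfold : ∀ (l : List Int) (acc : List (List String)),
      l.foldl (fun acc i => acc ++ [PySem.List.slice t (some i) (some (i + (m : Int)))]) acc
        = acc ++ l.map (fun i => PySem.List.slice t (some i) (some (i + (m : Int)))) := by
    intro l
    induction l with
    | nil => simp
    | cons a l ih => intro acc; simp [ih]
  rw [hfold, List.nil_append, List.map_map]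
  rw [← rangeMap_eq_windows t m h1 h2]
  apply List.map_congr_left
  intro i _
  have hki : ((i : Nat) : Int) + (m : Int) = ((i + m : Nat) : Int) := by omega
  simp only [Function.comp_apply, hki, PySem.List.slice_natCast]
  congr 1
  omega

lemma zipCols_eq_windows (t : List String) (k : Nat) (hk : 1 ≤ k) :
    zipCols t ((List.range (k - 1)).map (fun i => t.drop (i + 1))) = windows k t := by
  induction t with
  | nil => simp [zipCols, windows]
  | cons x xs ih =>
    rw [zipCols]
    have hall : (((List.range (k - 1)).map (fun i => List.drop (i + 1) (x :: xs))).all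
        (fun c => !c.isEmpty) = true) ↔ k ≤ xs.length + 1 := by
      simp only [List.all_map, List.all_eq_true, List.mem_range, Function.comp_apply,
        Bool.not_eq_true', List.isEmpty_eq_false_iff, ne_eq, List.drop_eq_nil_iff,
        List.length_cons, not_le]
      constructor
      · intro h
        by_cases hk1 : k = 1
        · omega
        · have := h (k - 2) (by omega); omega
      · intro h i hi; omega
    rw [windows]
    by_cases hcond : k ≤ xs.length + 1
    · rw [if_pos (hall.mpr hcond), if_pos hcond]
      congr 1
      · -- the first row equals take k (x :: xs)
        have htk : List.take k (x :: xs) = x :: List.take (k - 1) xs := by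
          cases k with
          | zero => omega
          | succ m => simp [List.take_succ_cons]
        rw [htk]
        congr 1
        rw [List.map_map]
        apply List.ext_getElem
        · simp; omega
        · intro i hi1 hi2
          simp only [List.getElem_map, List.getElem_range, Function.comp_apply,
            List.drop_succ_cons]
          rw [List.headD_eq_head?_getD, List.head?_drop, List.getElem_take]
          simp only [List.length_map, List.length_range] at hi1
          rw [List.getElem?_eq_getElem (by omega)]
          rfl
      · -- the recursive call matches windows k xs
        rw [List.map_map]
        have hmaps : ((List.range (k - 1)).map ((fun c => c.tail) ∘ fun i => List.drop (i + 1) (x :: xs)))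
            = (List.range (k - 1)).map (fun i => xs.drop (i + 1)) := by
          apply List.map_congr_left
          intro i _
          simp [List.drop_succ_cons, List.tail_drop]
        rw [hmaps, ih]
    · rw [if_neg (fun h => hcond (hall.mp h)), if_neg hcond]

lemma shingles_alt_eq_windows (t : List String) (m : Nat) (h1 : 1 ≤ m) (h2 : m ≤ t.length) :
    shingles_alt t (m : Int) = windows m t := by
  unfold shingles_alt
  rw [if_neg (by omega)]
  rw [PySem.List.pyRange_zero_natCast, List.map_map]
  have hmap : ∀ (l : List Nat),
      l.map ((fun i => PySem.List.slice t (some i) none) ∘ (fun j : Nat => (j : Int)))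
        = l.map (fun j => t.drop j) := by
    intro l
    apply List.map_congr_left
    intro j _
    exact PySem.List.slice_from_natCast t j
  rw [hmap]
  have hrange : List.range m = 0 :: (List.range (m - 1)).map Nat.succ := by
    rw [show m = (m - 1) + 1 by omega, List.range_succ_eq_map]
    simp
  rw [hrange, List.map_cons, List.map_map, List.drop_zero]
  have hrest : ((List.range (m - 1)).map ((fun j => t.drop j) ∘ Nat.succ))
      = (List.range (m - 1)).map (fun i => t.drop (i + 1)) := by
    apply List.map_congr_left
    intro i _
    rfl
  rw [hrest]
  exact zipCols_eq_windows t m h1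

-- ===== VERDICT (by name: the statement is the Claim_ definition above) =====
theorem shingles_spec : Claim_equal_shingles := by
  intro t k _
  unfold Spec_shingles
  by_cases h : 1 ≤ k ∧ k ≤ (t.length : Int)
  · have hm : k = ((k.toNat : Nat) : Int) := by omega
    rw [hm, shingles_eq_windows t k.toNat (by omega) (by omega),
      shingles_alt_eq_windows t k.toNat (by omega) (by omega)]
  · unfold shingles shingles_alt
    rw [if_pos (by omega), if_pos (by omega)]
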